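-- pv_equiv track=rewrite | github.com/Wu-duanduan/Swarm-confrontation | physical_law_tool.py | group_connected_obstacles
-- ===== SOURCE A (Python) =====
-- def is_connected(center1, center2, side_length):
--     """判断两个小障碍物是否连接"""
--     x1, y1 = center1
--     x2, y2 = center2
--     dx = abs(x1 - x2)
--     dy = abs(y1 - y2)
--     return (dx <= side_length and dy == 0) or (dy <= side_length and dx == 0)
--
-- def dfs(centers, index, visited, group, side_length):
--     """深度优先搜索，将相互连接的小障碍物加入同一组"""
--     visited[index] = True
--     group.append(centers[index])
--     for i in range(len(centers)):
--         if not visited[i] and is_connected(centers[index], centers[i], side_length):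
--             dfs(centers, i, visited, group, side_length)
--
-- def group_connected_obstacles(centers, side_length):
--     """将小障碍物分组"""
--     visited = [False] * len(centers)
--     groups = []
--     for i in range(len(centers)):
--         if not visited[i]:
--             group = []
--             dfs(centers, i, visited, group, side_length)
--             groups.append(group)
--     return groups
-- ===== SOURCE B (Python) =====
-- def is_connected(center1, center2, side_length):
--     x1, y1 = center1
--     x2, y2 = center2
--     dx = abs(x1 - x2)
--     dy = abs(y1 - y2)
--     return (dx <= side_length and dy == 0) or (dy <= side_length and dx == 0)
--
--
-- def _min_unvisited_neighbor(centers, side_length, visited, cur):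
--     j = 0
--     while j < len(centers):
--         if not visited[j] and is_connected(centers[cur], centers[j], side_length):
--             return j
--         j += 1
--     return None
--
--
-- def group_connected_obstacles(centers, side_length):
--     n = len(centers)
--     visited = [False] * n
--     groups = []
--     for s in range(n):
--         if not visited[s]:
--             visited[s] = True
--             group = [centers[s]]
--             stack = [s]
--             while stack:
--                 j = _min_unvisited_neighbor(centers, side_length, visited, stack[-1])
--                 if j is None:
--                     stack.pop()
--                 else:
--                     visited[j] = True
--                     group.append(centers[j])
--                     stack.append(j)
--             groups.append(group)
--     return groups
-- ===== Notes on version B (the rewrite author's own statement) =====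
-- stated objective: alternative
-- what changed: A's recursive DFS (each call rescans all indices and recurses) is replaced by an iterative DFS with an explicit stack: the loop repeatedly finds the first-index unvisited neighbor of the stack top, marks and pushes it, popping when none remains.
import Mathlib
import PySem

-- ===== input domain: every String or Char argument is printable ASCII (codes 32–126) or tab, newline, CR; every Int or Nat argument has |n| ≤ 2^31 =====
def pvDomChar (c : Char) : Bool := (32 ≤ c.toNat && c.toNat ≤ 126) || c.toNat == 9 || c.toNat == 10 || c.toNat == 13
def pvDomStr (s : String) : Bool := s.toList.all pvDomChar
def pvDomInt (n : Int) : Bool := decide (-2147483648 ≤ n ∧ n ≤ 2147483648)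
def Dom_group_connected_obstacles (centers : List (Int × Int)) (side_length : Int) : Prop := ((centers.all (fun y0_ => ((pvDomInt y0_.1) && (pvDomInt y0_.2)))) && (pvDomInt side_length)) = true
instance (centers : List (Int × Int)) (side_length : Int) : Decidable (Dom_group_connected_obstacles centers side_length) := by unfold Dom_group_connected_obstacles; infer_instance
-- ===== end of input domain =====

-- B replaces A's recursive DFS by an explicit-stack DFS that repeatedly marks the
-- first-index unvisited neighbor of the stack top (objective: alternative decomposition).

-- ===== PORT A =====
def is_connectedA (center1 center2 : Int × Int) (side_length : Int) : Bool :=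
  let dx := |center1.1 - center2.1|
  let dy := |center1.2 - center2.2|
  (decide (dx ≤ side_length) && decide (dy = 0)) || (decide (dy ≤ side_length) && decide (dx = 0))

-- A's recursive dfs; `fuel` bounds only the recursion depth (≤ number of unvisited
-- cells), it is a totalization guard and never changes the computed value.
def dfsA (centers : List (Int × Int)) (side_length : Int) :
    Nat → Nat → List Bool → List (Int × Int) → List Bool × List (Int × Int)
  | 0, _, visited, group => (visited, group)
  | fuel+1, index, visited, group =>
    let visited1 := visited.set index true
    let group1 := group ++ [centers.getD index (0, 0)]
    (List.range centers.length).foldl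
      (fun st i =>
        if !st.1.getD i false &&
            is_connectedA (centers.getD index (0, 0)) (centers.getD i (0, 0)) side_length then
          dfsA centers side_length fuel i st.1 st.2
        else st)
      (visited1, group1)

def group_connected_obstacles (centers : List (Int × Int)) (side_length : Int) :
    List (List (Int × Int)) :=
  ((List.range centers.length).foldl
    (fun st i =>
      if !st.1.getD i false then
        let r := dfsA centers side_length centers.length i st.1 []
        (r.1, st.2 ++ [r.2])
      else st)
    (List.replicate centers.length false, [])).2

-- ===== PORT B =====
def is_connectedB (center1 center2 : Int × Int) (side_length : Int) : Bool :=
  let dx := |center1.1 - center2.1|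
  let dy := |center1.2 - center2.2|
  (decide (dx ≤ side_length) && decide (dy = 0)) || (decide (dy ≤ side_length) && decide (dx = 0))

def minNbrB (centers : List (Int × Int)) (side_length : Int) (visited : List Bool) (cur : Nat) :
    Nat → Option Nat
  | j =>
    if j < centers.length then
      if !visited.getD j false &&
          is_connectedB (centers.getD cur (0, 0)) (centers.getD j (0, 0)) side_length then
        some j
      else minNbrB centers side_length visited cur (j+1)
    else none
  termination_by j => centers.length - j
  decreasing_by omega

-- B's while-loop over the explicit stack; `fuel` is consumed only when a new cell
-- is marked (a totalization guard; it never changes the computed value).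
def runB (centers : List (Int × Int)) (side_length : Int) :
    Nat → List Nat → List Bool → List (Int × Int) → List Bool × List (Int × Int)
  | _, [], visited, group => (visited, group)
  | 0, _::_, visited, group => (visited, group)
  | fuel+1, cur :: rest, visited, group =>
    match minNbrB centers side_length visited cur 0 with
    | none => runB centers side_length (fuel+1) rest visited group
    | some j =>
        runB centers side_length fuel (j :: cur :: rest)
          (visited.set j true) (group ++ [centers.getD j (0, 0)])
  termination_by fuel stack => (fuel, stack.length)
  decreasing_by
    · simp; omega
    · simp [Prod.lex_def]

def group_connected_obstacles_alt (centers : List (Int × Int)) (side_length : Int) :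
    List (List (Int × Int)) :=
  ((List.range centers.length).foldl
    (fun st s =>
      if !st.1.getD s false then
        let r := runB centers side_length centers.length [s]
                   (st.1.set s true) [centers.getD s (0, 0)]
        (r.1, st.2 ++ [r.2])
      else st)
    (List.replicate centers.length false, [])).2

-- ===== PRECONDITION & SPEC =====
def Spec_group_connected_obstacles (centers : List (Int × Int)) (side_length : Int) (out : List (List (Int × Int))) : Prop := out = group_connected_obstacles_alt centers side_length
instance (centers : List (Int × Int)) (side_length : Int) (out : List (List (Int × Int))) : Decidable (Spec_group_connected_obstacles centers side_length out) := by unfold Spec_group_connected_obstacles; infer_instance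

-- ===== CLAIM (what is proved, stated in full; the proofs are below) =====
def Claim_equal_group_connected_obstacles : Prop := ∀ (centers : List (Int × Int)) (side_length : Int), Dom_group_connected_obstacles centers side_length → Spec_group_connected_obstacles centers side_length (group_connected_obstacles centers side_length)

-- ===== LEMMAS AND PROOFS =====

-- A's fold step, named for the proofs.
def stepA (centers : List (Int × Int)) (side_length : Int) (fuel index : Nat)
    (st : List Bool × List (Int × Int)) (i : Nat) : List Bool × List (Int × Int) :=
  if !st.1.getD i false &&
      is_connectedA (centers.getD index (0, 0)) (centers.getD i (0, 0)) side_length then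
    dfsA centers side_length fuel i st.1 st.2
  else st

lemma dfsA_succ (centers : List (Int × Int)) (side_length : Int) (fuel index : Nat)
    (visited : List Bool) (group : List (Int × Int)) :
    dfsA centers side_length (fuel+1) index visited group =
      (List.range centers.length).foldl (stepA centers side_length fuel index)
        (visited.set index true, group ++ [centers.getD index (0, 0)]) := rfl

-- pointwise order on visited arrays: same length, trues only grow
def VLe (v w : List Bool) : Prop :=
  v.length = w.length ∧ ∀ k, v.getD k false = true → w.getD k false = true

lemma VLe_refl (v : List Bool) : VLe v v := ⟨rfl, fun _ h => h⟩

lemma VLe_trans {u v w : List Bool} (h1 : VLe u v) (h2 : VLe v w) : VLe u w :=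
  ⟨h1.1.trans h2.1, fun k hk => h2.2 k (h1.2 k hk)⟩

lemma VLe_set (v : List Bool) (i : Nat) : VLe v (v.set i true) := by
  refine ⟨(List.length_set ..).symm, fun k hk => ?_⟩
  by_cases hkl : k < v.length
  · by_cases hik : i = k
    · subst hik
      simp [List.getD, List.getElem?_set_self hkl]
    · simpa [List.getD, List.getElem?_set_ne hik] using hk
  · simp [List.getD, List.getElem?_eq_none (by omega : v.length ≤ k)] at hk

lemma countF_le_of_VLe : ∀ {v w : List Bool}, VLe v w → w.count false ≤ v.count false := by
  intro v
  induction v with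
  | nil => intro w h; cases w <;> simp_all [VLe]
  | cons a v ih =>
    intro w h
    cases w with
    | nil => simp [VLe] at h
    | cons b w =>
      have hlen : v.length = w.length := by simpa [VLe] using h.1
      have h0 : a = true → b = true := by
        have := h.2 0; simpa [List.getD] using this
      have htail : VLe v w := by
        refine ⟨hlen, fun k hk => ?_⟩
        have := h.2 (k+1); simpa [List.getD] using this hk
      have hc := ih htail
      cases a
      · cases b <;> simp <;> omega
      · have hb : b = true := h0 rfl
        subst hb
        simp
        omega

lemma getD_set_self (v : List Bool) (i : Nat) (h : i < v.length) :
    (v.set i true).getD i false = true := by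
  simp [List.getD, List.getElem?_set_self h]

lemma countF_pos (v : List Bool) (i : Nat) (h : i < v.length) (hv : v.getD i false = false) :
    1 ≤ v.count false := by
  have hg : v[i] = false := by
    simpa [List.getD, List.getElem?_eq_getElem h] using hv
  have : false ∈ v := hg ▸ List.getElem_mem h
  exact List.count_pos_iff.mpr this

lemma countF_set_lt (v : List Bool) (i : Nat) (h : i < v.length) (hv : v.getD i false = false) :
    (v.set i true).count false < v.count false := by
  induction v generalizing i with
  | nil => simp at h
  | cons a v ih =>
    cases i with
    | zero =>
      simp [List.getD] at hv; subst hv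
      simp
    | succ i =>
      have h' : i < v.length := by simpa using h
      have hv' : v.getD i false = false := by simpa [List.getD] using hv
      have := ih i h' hv'
      cases a <;> simp [List.set] <;> omega

-- monotonicity of dfsA and of its fold
lemma monoA : ∀ (fuel : Nat) (centers : List (Int × Int)) (side_length : Int)
    (index : Nat) (v : List Bool) (g : List (Int × Int)),
    VLe v (dfsA centers side_length fuel index v g).1 := by
  intro fuel
  induction fuel with
  | zero => intro centers side_length index v g; exact VLe_refl v
  | succ fuel ih =>
    intro centers side_length index v g
    rw [dfsA_succ]
    have key : ∀ (l : List Nat) (st : List Bool × List (Int × Int)),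
        VLe st.1 ((l.foldl (stepA centers side_length fuel index) st)).1 := by
      intro l
      induction l with
      | nil => intro st; exact VLe_refl _
      | cons a l ihl =>
        intro st
        refine VLe_trans ?_ (ihl (stepA centers side_length fuel index st a))
        unfold stepA
        split
        · exact ih centers side_length a st.1 st.2
        · exact VLe_refl _
    exact VLe_trans (VLe_set v index) (key (List.range centers.length) (v.set index true, g ++ [centers.getD index (0, 0)]))

lemma monoFoldA (centers : List (Int × Int)) (side_length : Int) (fuel index : Nat)
    (l : List Nat) (st : List Bool × List (Int × Int)) :
    VLe st.1 ((l.foldl (stepA centers side_length fuel index) st)).1 := by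
  induction l generalizing st with
  | nil => exact VLe_refl _
  | cons a l ihl =>
    refine VLe_trans ?_ (ihl (stepA centers side_length fuel index st a))
    unfold stepA
    split
    · exact monoA fuel centers side_length a st.1 st.2
    · exact VLe_refl _

lemma is_connectedB_eq : is_connectedB = is_connectedA := rfl

-- minNbrB skips an initial segment on which the loop condition fails
lemma minNbr_skip (centers : List (Int × Int)) (side_length : Int) (v : List Bool) (cur : Nat) :
    ∀ (i : Nat),
    (∀ j, j < i →
      (!v.getD j false &&
        is_connectedA (centers.getD cur (0, 0)) (centers.getD j (0, 0)) side_length) = false) →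
    minNbrB centers side_length v cur 0 = minNbrB centers side_length v cur i := by
  intro i
  induction i with
  | zero => intro _; rfl
  | succ i ih =>
    intro h
    have h' := ih (fun j hj => h j (by omega))
    rw [h']
    rw [minNbrB]
    by_cases hi : i < centers.length
    · simp only [hi, if_true]
      rw [is_connectedB_eq, h i (by omega)]
      simp
    · have hi1 : ¬ i + 1 < centers.length := by omega
      rw [minNbrB]
      simp [hi, hi1]

lemma minNbr_none (centers : List (Int × Int)) (side_length : Int) (v : List Bool) (cur : Nat) :
    ∀ (i : Nat), centers.length ≤ i → minNbrB centers side_length v cur i = none := by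
  intro i hi
  rw [minNbrB]
  simp [Nat.not_lt.mpr hi]

lemma minNbr_some_elim (centers : List (Int × Int)) (side_length : Int) (v : List Bool)
    (cur : Nat) : ∀ (d i j : Nat), centers.length - i ≤ d →
    minNbrB centers side_length v cur i = some j →
    j < centers.length ∧ v.getD j false = false ∧
      is_connectedA (centers.getD cur (0, 0)) (centers.getD j (0, 0)) side_length = true := by
  intro d
  induction d with
  | zero =>
    intro i j hd h
    have hi : ¬ i < centers.length := by omega
    rw [minNbrB] at h
    simp [hi] at h
  | succ d ih =>
    intro i j hd h
    rw [minNbrB] at h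
    by_cases hi : i < centers.length
    · simp only [hi, if_true] at h
      by_cases hc : (!v.getD i false &&
          is_connectedA (centers.getD cur (0, 0)) (centers.getD i (0, 0)) side_length) = true
      · rw [is_connectedB_eq] at h
        rw [if_pos hc] at h
        obtain ⟨h1, h2⟩ := Bool.and_eq_true_iff.mp hc
        cases h
        exact ⟨hi, by simpa using h1, h2⟩
      · rw [is_connectedB_eq] at h
        rw [if_neg hc] at h
        exact ih (i+1) j (by omega) h
    · simp [hi] at h

-- with count false v = 0 (and visited as long as centers) runB only pops
lemma runB_pops (centers : List (Int × Int)) (side_length : Int) (v : List Bool)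
    (hlen : v.length = centers.length) (h0 : v.count false = 0) :
    ∀ (stack : List Nat) (f : Nat) (g : List (Int × Int)),
    runB centers side_length f stack v g = (v, g) := by
  intro stack
  induction stack with
  | nil => intro f g; cases f <;> simp [runB]
  | cons cur rest ih =>
    intro f g
    cases f with
    | zero => simp [runB]
    | succ f =>
      have hnone : minNbrB centers side_length v cur 0 = none := by
        cases hj : minNbrB centers side_length v cur 0 with
        | none => rfl
        | some j =>
          obtain ⟨hjl, hjv, _⟩ :=
            minNbr_some_elim centers side_length v cur centers.length 0 j (by omega) hj
          have := countF_pos v j (by omega) hjv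
          omega
      rw [runB, hnone]
      exact ih (f+1) g

-- one extra unit of fuel does not change runB once fuel covers the unvisited count
lemma runB_succ (centers : List (Int × Int)) (side_length : Int) :
    ∀ (m : Nat) (v : List Bool) (stack : List Nat) (g : List (Int × Int)) (f : Nat),
    v.length = centers.length → v.count false ≤ m → v.count false ≤ f →
    runB centers side_length f stack v g = runB centers side_length (f+1) stack v g := by
  intro m
  induction m using Nat.strong_induction_on with
  | _ m ihm =>
    intro v stack
    induction stack with
    | nil => intro g f _ _ _; simp [runB]
    | cons cur rest ih =>
      intro g f hlen hm hf
      cases hj : minNbrB centers side_length v cur 0 with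
      | none =>
        cases f with
        | zero =>
          have h0 : v.count false = 0 := by omega
          rw [runB_pops centers side_length v hlen h0, runB, hj,
              runB_pops centers side_length v hlen h0]
        | succ f =>
          rw [runB, hj, runB, hj]
          exact ih g (f+1) hlen hm hf
      | some j =>
        obtain ⟨hjl, hjv, _⟩ :=
          minNbr_some_elim centers side_length v cur centers.length 0 j (by omega) hj
        have hpos := countF_pos v j (by omega) hjv
        have hlt := countF_set_lt v j (by omega) hjv
        cases f with
        | zero => omega
        | succ f =>
          rw [runB, hj, runB, hj]
          cases m with
          | zero => omega
          | succ m =>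
            exact ihm m (by omega) (v.set j true) (j :: cur :: rest)
              (g ++ [centers.getD j (0, 0)]) f
              (by rw [List.length_set]; exact hlen) (by omega) (by omega)

-- fuel-insensitivity of runB above the count of unvisited cells
lemma runB_fuel (centers : List (Int × Int)) (side_length : Int)
    (v : List Bool) (stack : List Nat) (g : List (Int × Int)) (f1 f2 : Nat)
    (hlen : v.length = centers.length)
    (h1 : v.count false ≤ f1) (h2 : v.count false ≤ f2) :
    runB centers side_length f1 stack v g = runB centers side_length f2 stack v g := by
  have step : ∀ (d f : Nat), v.count false ≤ f →
      runB centers side_length f stack v g = runB centers side_length (f+d) stack v g := by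
    intro d
    induction d with
    | zero => intro f _; rfl
    | succ d ihd =>
      intro f hf
      rw [ihd f hf, runB_succ centers side_length (v.count false) v stack g (f+d) hlen le_rfl (by omega)]
      ring_nf
  rcases Nat.le_total f1 f2 with h | h
  · have := step (f2 - f1) f1 h1
    rw [this, Nat.add_sub_cancel' h]
  · have := step (f1 - f2) f2 h2
    rw [this, Nat.add_sub_cancel' h]

-- the master simulation lemma: processing `cur` on B's stack equals A's dfs loop from i
lemma ML (centers : List (Int × Int)) (side_length : Int) :
    ∀ (m : Nat) (k i cur : Nat) (v : List Bool) (g : List (Int × Int)) (rest : List Nat)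
      (fa fb : Nat),
    i + k = centers.length →
    v.length = centers.length →
    v.getD cur false = true →
    v.count false ≤ m → v.count false ≤ fa → v.count false ≤ fb →
    (∀ j, j < i →
      (!v.getD j false &&
        is_connectedA (centers.getD cur (0, 0)) (centers.getD j (0, 0)) side_length) = false) →
    runB centers side_length fb (cur :: rest) v g =
      runB centers side_length fb rest
        ((List.range' i k).foldl (stepA centers side_length fa cur) (v, g)).1
        ((List.range' i k).foldl (stepA centers side_length fa cur) (v, g)).2 := by
  intro m
  induction m using Nat.strong_induction_on with
  | _ m ihm =>
    intro k
    induction k with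
    | zero =>
      intro i cur v g rest fa fb hik hlen hcur hm hfa hfb hinv
      simp only [List.range'_zero, List.foldl_nil]
      cases fb with
      | zero =>
        have h0 : v.count false = 0 := by omega
        rw [runB_pops centers side_length v hlen h0, runB_pops centers side_length v hlen h0]
      | succ fb =>
        have hnone : minNbrB centers side_length v cur 0 = none := by
          rw [minNbr_skip centers side_length v cur centers.length
                (fun j hj => hinv j (by omega)),
              minNbr_none centers side_length v cur centers.length le_rfl]
        rw [runB, hnone]
    | succ k ihk =>
      intro i cur v g rest fa fb hik hlen hcur hm hfa hfb hinv
      have hin : i < centers.length := by omega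
      rw [List.range'_succ]
      simp only [List.foldl_cons]
      by_cases hc : (!v.getD i false &&
          is_connectedA (centers.getD cur (0, 0)) (centers.getD i (0, 0)) side_length) = true
      case neg =>
        have hstep : stepA centers side_length fa cur (v, g) i = (v, g) := by
          unfold stepA; rw [if_neg hc]
        rw [hstep]
        refine ihk (i+1) cur v g rest fa fb (by omega) hlen hcur hm hfa hfb ?_
        intro j hj
        rcases Nat.lt_or_ge j i with h | h
        · exact hinv j h
        · have hji : j = i := by omega
          subst hji
          exact Bool.eq_false_iff.mpr (fun h' => hc (by simpa using h'))
      case pos =>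
        obtain ⟨hvi', hconn⟩ := Bool.and_eq_true_iff.mp hc
        have hvi : v.getD i false = false := by simpa using hvi'
        have hil : i < v.length := by omega
        have hpos := countF_pos v i hil hvi
        have hlt := countF_set_lt v i hil hvi
        obtain ⟨fa', rfl⟩ : ∃ t, fa = t + 1 := ⟨fa - 1, by omega⟩
        obtain ⟨fb', rfl⟩ : ∃ t, fb = t + 1 := ⟨fb - 1, by omega⟩
        obtain ⟨m', rfl⟩ : ∃ t, m = t + 1 := ⟨m - 1, by omega⟩
        have hsome : minNbrB centers side_length v cur 0 = some i := by
          rw [minNbr_skip centers side_length v cur i (fun j hj => hinv j hj), minNbrB,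
              is_connectedB_eq, if_pos hin, if_pos hc]
        have hlen1 : (v.set i true).length = centers.length := by
          rw [List.length_set]; exact hlen
        have hcur1 : (v.set i true).getD i false = true := getD_set_self v i hil
        have hstep1 : stepA centers side_length (fa' + 1) cur (v, g) i =
            dfsA centers side_length (fa' + 1) i v g := by
          simp only [stepA]; rw [if_pos hc]
        have hstep : stepA centers side_length (fa' + 1) cur (v, g) i =
            (List.range' 0 centers.length).foldl (stepA centers side_length fa' i)
              (v.set i true, g ++ [centers.getD i (0, 0)]) := by
          rw [hstep1, dfsA_succ, List.range_eq_range']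
        have hmono1 : VLe (v.set i true)
            ((List.range' 0 centers.length).foldl (stepA centers side_length fa' i)
              (v.set i true, g ++ [centers.getD i (0, 0)])).1 :=
          monoFoldA centers side_length fa' i (List.range' 0 centers.length)
            (v.set i true, g ++ [centers.getD i (0, 0)])
        set R := (List.range' 0 centers.length).foldl (stepA centers side_length fa' i)
          (v.set i true, g ++ [centers.getD i (0, 0)]) with hR
        have hout := ihm m' (by omega) centers.length 0 i (v.set i true)
            (g ++ [centers.getD i (0, 0)]) (cur :: rest) fa' fb'
            (by omega) hlen1 hcur1 (by omega) (by omega) (by omega)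
            (fun j hj => absurd hj (by omega))
        have hcR : R.1.count false ≤ (v.set i true).count false := countF_le_of_VLe hmono1
        have hlenR : R.1.length = centers.length := by rw [← hmono1.1]; exact hlen1
        have hcurR : R.1.getD cur false = true := hmono1.2 cur ((VLe_set v i).2 cur hcur)
        have hinv' : ∀ j, j < i + 1 →
            (!R.1.getD j false &&
              is_connectedA (centers.getD cur (0, 0)) (centers.getD j (0, 0)) side_length)
              = false := by
          intro j hj
          rcases Nat.lt_or_ge j i with h | h
          · by_cases hcj : is_connectedA (centers.getD cur (0, 0)) (centers.getD j (0, 0))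
                side_length = true
            · have hvj : v.getD j false = true := by
                have := hinv j h
                rw [hcj] at this
                simpa using this
              have hrj : R.1.getD j false = true :=
                hmono1.2 j ((VLe_set v i).2 j hvj)
              rw [hrj]
              simp
            · rw [Bool.not_eq_true] at hcj
              rw [hcj, Bool.and_false]
          · have hji : j = i := by omega
            subst hji
            have hrj : R.1.getD j false = true := hmono1.2 j hcur1
            rw [hrj]
            simp
        have hfin := ihk (i+1) cur R.1 R.2 rest (fa' + 1) fb' (by omega) hlenR hcurR
          (by omega) (by omega) (by omega) hinv'
        have hQmono : VLe R.1
            ((List.range' (i+1) k).foldl (stepA centers side_length (fa' + 1) cur)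
              (R.1, R.2)).1 := monoFoldA centers side_length (fa' + 1) cur _ _
        rw [← hR] at hout
        rw [hstep, runB, hsome]
        dsimp only
        rw [hout]
        rw [show (R.1, R.2) = R from rfl] at hfin hQmono
        rw [hfin]
        exact runB_fuel centers side_length _ rest _ fb' (fb' + 1)
          (by rw [← hQmono.1]; exact hlenR)
          (le_trans (le_trans (countF_le_of_VLe hQmono) hcR) (by omega))
          (le_trans (le_trans (countF_le_of_VLe hQmono) hcR) (by omega))

lemma runB_nil (centers : List (Int × Int)) (side_length : Int) (f : Nat)
    (v : List Bool) (g : List (Int × Int)) :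
    runB centers side_length f [] v g = (v, g) := by
  cases f <;> simp [runB]

-- per-component step: B's stack run from a fresh start equals A's dfs call
lemma component_eq (centers : List (Int × Int)) (side_length : Int) (a : Nat)
    (v : List Bool) (ha : a < centers.length) (hlen : v.length = centers.length)
    (hva : v.getD a false = false) :
    runB centers side_length centers.length [a] (v.set a true) [centers.getD a (0, 0)] =
      dfsA centers side_length centers.length a v [] := by
  have hal : a < v.length := by omega
  have hlt := countF_set_lt v a hal hva
  have hcv : v.count false ≤ v.length := List.count_le_length
  obtain ⟨n', hn⟩ : ∃ t, centers.length = t + 1 := ⟨centers.length - 1, by omega⟩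
  have hml := ML centers side_length ((v.set a true).count false) centers.length 0 a
    (v.set a true) [centers.getD a (0, 0)] [] n' centers.length
    (by omega) (by rw [List.length_set]; exact hlen) (getD_set_self v a hal)
    le_rfl (by omega) (by omega) (fun j hj => absurd hj (by omega))
  rw [hml, runB_nil]
  have : dfsA centers side_length centers.length a v [] =
      (List.range' 0 centers.length).foldl (stepA centers side_length n' a)
        (v.set a true, [] ++ [centers.getD a (0, 0)]) := by
    rw [hn, dfsA_succ, List.range_eq_range', ← hn]
  rw [this]
  rfl

-- the two top-level folds coincide
lemma TOP (centers : List (Int × Int)) (side_length : Int) :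
    ∀ (l : List Nat) (v : List Bool) (G : List (List (Int × Int))),
    v.length = centers.length → (∀ x ∈ l, x < centers.length) →
    l.foldl
      (fun st i =>
        if !st.1.getD i false then
          let r := dfsA centers side_length centers.length i st.1 []
          (r.1, st.2 ++ [r.2])
        else st) (v, G) =
    l.foldl
      (fun st s =>
        if !st.1.getD s false then
          let r := runB centers side_length centers.length [s]
                     (st.1.set s true) [centers.getD s (0, 0)]
          (r.1, st.2 ++ [r.2])
        else st) (v, G) := by
  intro l
  induction l with
  | nil => intro v G _ _; rfl
  | cons a l ih =>
    intro v G hlen hmem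
    have ha : a < centers.length := hmem a List.mem_cons_self
    simp only [List.foldl_cons]
    by_cases hv : v.getD a false = true
    · simp only [hv, Bool.not_true, Bool.false_eq_true, if_false]
      exact ih v G hlen (fun x hx => hmem x (List.mem_cons_of_mem a hx))
    · rw [Bool.not_eq_true] at hv
      simp only [hv, Bool.not_false, if_true]
      rw [component_eq centers side_length a v ha hlen hv]
      have hmono := monoA centers.length centers side_length a v []
      exact ih (dfsA centers side_length centers.length a v []).1 _
        (by rw [← hmono.1]; exact hlen)
        (fun x hx => hmem x (List.mem_cons_of_mem a hx))

-- ===== VERDICT (by name: the statement is the Claim_ definition above) =====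
theorem group_connected_obstacles_spec : Claim_equal_group_connected_obstacles := by
  intro centers side_length _
  unfold Spec_group_connected_obstacles group_connected_obstacles group_connected_obstacles_alt
  rw [TOP centers side_length (List.range centers.length)
      (List.replicate centers.length false) []
      (List.length_replicate)
      (fun x hx => List.mem_range.mp hx)]
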